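-- pv_equiv track=rewrite | github.com/doobMM/hibari_tda | tda_pipeline/preprocessing.py | group_notes_with_duration
-- ===== SOURCE A (Python) =====
-- from typing import Dict, List, Tuple, Optional, Set, FrozenSet
--
-- def group_notes_with_duration(note_list: List[Tuple[int, int, int]]) -> Dict[int, Set[Tuple[int, int]]]:
--     """
--     각 시점에서 활성화된 (pitch, duration) 집합을 구합니다.
--
--     최적화: 이전 코드는 매 note마다 모든 시점을 순회(O(N*max_duration))했으나,
--     여기서는 이벤트 기반으로 처리하여 불필요한 반복을 줄입니다.
--     """
--     if not note_list:
--         return {}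
--
--     # 1) note별 duration 미리 계산
--     notes_with_dur = [(s, p, e, e - s) for s, p, e in note_list]
--
--     # 2) 시간 범위 파악
--     max_time = max(e for _, _, e, _ in notes_with_dur)
--
--     # 3) 각 시점별 활성 음 집합 구축
--     #    - 시작/종료 이벤트를 정렬하는 대신,
--     #      note가 짧으므로(최대 6 eighth) 직접 range로 삽입
--     result: Dict[int, Set[Tuple[int, int]]] = {}
--
--     for s, p, e, d in notes_with_dur:
--         entry = (p, d)
--         for t in range(s, e):
--             if t not in result:
--                 result[t] = set()
--             result[t].add(entry)
--
--     # 4) 빈 시점 채우기 (기존 코드와 동일: min_start ~ max_active_time 범위)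
--     if not result:
--         return {}
--     min_t = min(result.keys())
--     max_t = max(result.keys())
--     filled = {}
--     for t in range(min_t, max_t + 1):
--         filled[t] = result.get(t)  # None if not present
--
--     return filled
-- ===== SOURCE B (Python) =====
-- from typing import Dict, List, Tuple, Optional, Set
--
-- def group_notes_with_duration(note_list: List[Tuple[int, int, int]]) -> Dict[int, Optional[Set[Tuple[int, int]]]]:
--     # Per-time-point scan: keep only the nonempty notes, compute the time range
--     # directly from them, and build each time point's active set by one scan of
--     # the notes, instead of filling a dict note-by-note and post-filling gaps.
--     spans = [(s, p, e) for s, p, e in note_list if s < e]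
--     if not spans:
--         return {}
--     min_t = min(s for s, _, _ in spans)
--     max_t = max(e for _, _, e in spans) - 1
--     out: Dict[int, Optional[Set[Tuple[int, int]]]] = {}
--     for t in range(min_t, max_t + 1):
--         active = {(p, e - s) for s, p, e in spans if s <= t < e}
--         out[t] = active if active else None
--     return out
-- ===== Notes on version B (the rewrite author's own statement) =====
-- stated objective: alternative
-- what changed: Replaces the note-by-note dict fill (per-note range insertion into sets, then min/max over the accumulated keys and a gap-filling second pass) by a direct per-time-point scan: the time range is computed straight from the nonempty notes and each time point's active set is built by one comprehension over the notes.
import Mathlib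
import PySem

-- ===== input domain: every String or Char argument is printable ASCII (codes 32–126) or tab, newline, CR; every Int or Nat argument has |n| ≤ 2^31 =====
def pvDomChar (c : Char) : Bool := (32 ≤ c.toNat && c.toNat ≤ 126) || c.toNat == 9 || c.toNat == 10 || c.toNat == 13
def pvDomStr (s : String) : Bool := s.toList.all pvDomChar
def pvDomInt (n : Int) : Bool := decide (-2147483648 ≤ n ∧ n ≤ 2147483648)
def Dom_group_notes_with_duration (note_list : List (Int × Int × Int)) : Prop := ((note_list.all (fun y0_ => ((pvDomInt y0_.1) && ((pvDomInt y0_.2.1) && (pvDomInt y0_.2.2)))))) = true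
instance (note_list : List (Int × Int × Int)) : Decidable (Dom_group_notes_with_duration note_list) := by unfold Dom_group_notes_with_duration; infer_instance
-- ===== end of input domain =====

-- B replaces A's note-by-note dict fill + gap-filling pass by a direct per-time-point
-- scan over the nonempty notes; alternative decomposition, same results.


-- ===== PORT A =====
-- one time step of A's inner loop: ensure result[t] exists, then result[t].add(entry)
def pvStep (en : Int × Int) (r : PySem.Dict Int (PySem.Set (Int × Int))) (t : Int) :
    PySem.Dict Int (PySem.Set (Int × Int)) :=
  (if r.contains t then r else r.insert t PySem.Set.empty).modify t PySem.Set.empty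
    (fun s => PySem.Set.add s en)

-- one note's inner loop: for t in range(s, e): …
def pvProcNote (r : PySem.Dict Int (PySem.Set (Int × Int))) (n : Int × Int × Int × Int) :
    PySem.Dict Int (PySem.Set (Int × Int)) :=
  (PySem.List.pyRange n.1 n.2.2.1 1).foldl (pvStep (n.2.1, n.2.2.2)) r

def group_notes_with_duration (note_list : List (Int × Int × Int)) : List (Int × Option (List (Int × Int))) :=
  if note_list = [] then []
  else
    let nwd := note_list.map (fun x => (x.1, x.2.1, x.2.2, x.2.2 - x.1))
    let _max_time := PySem.List.max? (nwd.map (fun n => n.2.2.1)) (fun e => e)  -- computed but unused in A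
    let result := nwd.foldl pvProcNote PySem.Dict.empty
    if result.items = [] then []
    else
      let min_t := (PySem.List.min? result.keys (fun k => k)).getD 0
      let max_t := (PySem.List.max? result.keys (fun k => k)).getD 0
      ((PySem.List.pyRange min_t (max_t + 1) 1).foldl
        (fun d t => d.insert t (result.get? t)) PySem.Dict.empty).items

-- ===== PORT B =====
def group_notes_with_duration_alt (note_list : List (Int × Int × Int)) : List (Int × Option (List (Int × Int))) :=
  let spans := note_list.filter (fun x => x.1 < x.2.2)
  if spans = [] then []
  else
    let min_t := (PySem.List.min? (spans.map (fun x => x.1)) (fun k => k)).getD 0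
    let max_t := (PySem.List.max? (spans.map (fun x => x.2.2)) (fun k => k)).getD 0 - 1
    (PySem.List.pyRange min_t (max_t + 1) 1).map (fun t =>
      let active : PySem.Set (Int × Int) :=
        PySem.Set.ofList ((spans.filter (fun x => x.1 ≤ t ∧ t < x.2.2)).map (fun x => (x.2.1, x.2.2 - x.1)))
      (t, if active = [] then none else some active))

-- ===== PRECONDITION & SPEC =====
def Spec_group_notes_with_duration (note_list : List (Int × Int × Int)) (out : List (Int × Option (List (Int × Int)))) : Prop := out = group_notes_with_duration_alt note_list
instance (note_list : List (Int × Int × Int)) (out : List (Int × Option (List (Int × Int)))) : Decidable (Spec_group_notes_with_duration note_list out) := by unfold Spec_group_notes_with_duration; infer_instance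

-- ===== CLAIM (what is proved, stated in full; the proofs are below) =====
def Claim_equal_group_notes_with_duration : Prop := ∀ (note_list : List (Int × Int × Int)), Dom_group_notes_with_duration note_list → Spec_group_notes_with_duration note_list (group_notes_with_duration note_list)

-- ===== LEMMAS AND PROOFS =====

theorem pvSet_add_self {α : Type} [BEq α] [LawfulBEq α] (s : PySem.Set α) (x : α) :
    (PySem.Set.add s x).add x = PySem.Set.add s x := by
  simp [PySem.Set.add, PySem.Set.contains]
  split <;> simp_all

theorem pvFoldl_add_ne_nil {α : Type} [BEq α] (l : List α) (s : PySem.Set α) (hs : s ≠ []) :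
    l.foldl PySem.Set.add s ≠ [] := by
  induction l generalizing s with
  | nil => exact hs
  | cons x l ih =>
    simp only [List.foldl_cons]
    refine ih _ ?_
    simp only [PySem.Set.add]; split
    · exact hs
    · simp

theorem pvOfList_ne_nil {α : Type} [BEq α] (xs : List α) (h : xs ≠ []) :
    PySem.Set.ofList xs ≠ [] := by
  cases xs with
  | nil => exact absurd rfl h
  | cons x l =>
    rw [PySem.Set.ofList_eq_foldl]
    simp only [List.foldl_cons]
    exact pvFoldl_add_ne_nil l _ (by simp [PySem.Set.add, PySem.Set.contains])

theorem pvGet?_eq_ite {κ ν : Type} [BEq κ] (d : PySem.Dict κ ν) (k : κ) (d0 : ν) :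
    d.get? k = if d.contains k = true then some (d.getD k d0) else none := by
  cases h : d.get? k <;>
    simp [PySem.Dict.contains_eq_isSome_get?, PySem.Dict.getD_eq_get?_getD, h]

theorem pvStep_getD (en : Int × Int) (r : PySem.Dict Int (PySem.Set (Int × Int))) (u t : Int) :
    (pvStep en r u).getD t [] =
      if t = u then (r.getD t []).add en else r.getD t [] := by
  unfold pvStep
  simp only [PySem.Set.empty]
  by_cases h : t = u
  · subst h
    rw [PySem.Dict.getD_modify_self]
    split
    · simp
    · next hc =>
      rw [PySem.Dict.getD_insert, if_pos rfl,
        PySem.Dict.getD_of_not_contains r _ (by simpa using hc)]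
      simp
  · rw [if_neg h, PySem.Dict.getD_modify, if_neg h]
    split
    · rfl
    · rw [PySem.Dict.getD_insert, if_neg h]

theorem pvStep_contains (en : Int × Int) (r : PySem.Dict Int (PySem.Set (Int × Int))) (u t : Int) :
    (pvStep en r u).contains t = (t == u || r.contains t) := by
  unfold pvStep
  rw [PySem.Dict.contains_modify]
  split
  · rfl
  · rw [PySem.Dict.contains_insert]
    cases h : (t == u) <;> simp [h]

theorem pvFoldSteps_getD (en : Int × Int) (t : Int) (ts : List Int) :
    ∀ r : PySem.Dict Int (PySem.Set (Int × Int)),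
      ((ts.foldl (pvStep en) r).getD t []) =
        if t ∈ ts then (r.getD t []).add en else r.getD t [] := by
  induction ts with
  | nil => intro r; simp
  | cons u ts ih =>
    intro r
    simp only [List.foldl_cons, ih, pvStep_getD, List.mem_cons]
    by_cases hu : t = u <;> by_cases ht : t ∈ ts <;>
      simp [hu, ht, pvSet_add_self]

theorem pvFoldSteps_contains (en : Int × Int) (t : Int) (ts : List Int) :
    ∀ r : PySem.Dict Int (PySem.Set (Int × Int)),
      ((ts.foldl (pvStep en) r).contains t) = (decide (t ∈ ts) || r.contains t) := by
  induction ts with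
  | nil => intro r; simp
  | cons u ts ih =>
    intro r
    simp only [List.foldl_cons, ih, pvStep_contains, List.mem_cons]
    by_cases hu : t = u <;> by_cases ht : t ∈ ts <;> simp [hu, ht]

theorem pvProcNote_getD (r : PySem.Dict Int (PySem.Set (Int × Int)))
    (n : Int × Int × Int × Int) (t : Int) :
    (pvProcNote r n).getD t [] =
      if n.1 ≤ t ∧ t < n.2.2.1 then (r.getD t []).add (n.2.1, n.2.2.2) else r.getD t [] := by
  unfold pvProcNote
  rw [pvFoldSteps_getD]
  by_cases h : n.1 ≤ t ∧ t < n.2.2.1 <;>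
    simp [PySem.List.mem_pyRange_one, h]

theorem pvProcNote_contains (r : PySem.Dict Int (PySem.Set (Int × Int)))
    (n : Int × Int × Int × Int) (t : Int) :
    (pvProcNote r n).contains t =
      (decide (n.1 ≤ t ∧ t < n.2.2.1) || r.contains t) := by
  unfold pvProcNote
  rw [pvFoldSteps_contains]
  by_cases h : n.1 ≤ t ∧ t < n.2.2.1 <;>
    simp [PySem.List.mem_pyRange_one, h]

theorem pvNotesFold_getD (t : Int) (ns : List (Int × Int × Int × Int)) :
    ∀ r : PySem.Dict Int (PySem.Set (Int × Int)),
      (ns.foldl pvProcNote r).getD t [] =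
        (ns.filter (fun n => decide (n.1 ≤ t ∧ t < n.2.2.1))).foldl
          (fun s n => PySem.Set.add s (n.2.1, n.2.2.2)) (r.getD t []) := by
  induction ns with
  | nil => intro r; simp
  | cons n ns ih =>
    intro r
    simp only [List.foldl_cons, ih, List.filter_cons]
    by_cases h : n.1 ≤ t ∧ t < n.2.2.1 <;>
      simp [h, pvProcNote_getD]

theorem pvNotesFold_contains (t : Int) (ns : List (Int × Int × Int × Int)) :
    ∀ r : PySem.Dict Int (PySem.Set (Int × Int)),
      (ns.foldl pvProcNote r).contains t =
        (ns.any (fun n => decide (n.1 ≤ t ∧ t < n.2.2.1)) || r.contains t) := by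
  induction ns with
  | nil => intro r; simp
  | cons n ns ih =>
    intro r
    simp only [List.foldl_cons, ih, List.any_cons, pvProcNote_contains]
    cases h : decide (n.1 ≤ t ∧ t < n.2.2.1) <;> simp [h, Bool.or_comm, Bool.or_assoc]

theorem pvResult_contains (note_list : List (Int × Int × Int)) (t : Int) :
    ((note_list.map (fun x => (x.1, x.2.1, x.2.2, x.2.2 - x.1))).foldl pvProcNote
        PySem.Dict.empty).contains t =
      note_list.any (fun x => decide (x.1 ≤ t ∧ t < x.2.2)) := by
  rw [pvNotesFold_contains]
  simp [List.any_map, Function.comp_def]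

theorem pvResult_getD (note_list : List (Int × Int × Int)) (t : Int) :
    ((note_list.map (fun x => (x.1, x.2.1, x.2.2, x.2.2 - x.1))).foldl pvProcNote
        PySem.Dict.empty).getD t [] =
      PySem.Set.ofList ((note_list.filter (fun x => decide (x.1 ≤ t ∧ t < x.2.2))).map
        (fun x => (x.2.1, x.2.2 - x.1))) := by
  rw [pvNotesFold_getD, PySem.Set.ofList_eq_foldl, List.filter_map, List.foldl_map,
    List.foldl_map]
  simp [Function.comp_def, PySem.Dict.getD_empty]

-- filtering by "covers t" through note_list or through the nonempty spans is the same
theorem pvFilter_cov_spans (note_list : List (Int × Int × Int)) (t : Int) :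
    (note_list.filter (fun x => decide (x.1 < x.2.2))).filter
        (fun x => decide (x.1 ≤ t ∧ t < x.2.2)) =
      note_list.filter (fun x => decide (x.1 ≤ t ∧ t < x.2.2)) := by
  rw [List.filter_filter]
  apply List.filter_congr
  intro x hx
  by_cases h : x.1 ≤ t ∧ t < x.2.2 <;> simp [h] <;> omega

theorem group_notes_with_duration_agree (note_list : List (Int × Int × Int)) :
    group_notes_with_duration note_list = group_notes_with_duration_alt note_list := by
  by_cases h0 : note_list = []
  · subst h0; rfl
  · rw [group_notes_with_duration, group_notes_with_duration_alt, if_neg h0]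
    simp only []
    set S := note_list.filter (fun x => decide (x.1 < x.2.2)) with hS
    set R := List.foldl pvProcNote PySem.Dict.empty
        (List.map (fun x => (x.1, x.2.1, x.2.2, x.2.2 - x.1)) note_list) with hR
    have hcontains : ∀ t : Int, R.contains t = true ↔ ∃ x ∈ S, x.1 ≤ t ∧ t < x.2.2 := by
      intro t
      rw [hR, pvResult_contains, List.any_eq_true, hS]
      constructor
      · rintro ⟨x, hx, hcov⟩
        simp only [decide_eq_true_eq] at hcov
        exact ⟨x, List.mem_filter.mpr ⟨hx, by simp; omega⟩, hcov⟩
      · rintro ⟨x, hx, hcov⟩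
        exact ⟨x, (List.mem_filter.mp hx).1, by simpa using hcov⟩
    have hkeysmem : ∀ t : Int, t ∈ R.keys ↔ ∃ x ∈ S, x.1 ≤ t ∧ t < x.2.2 :=
      fun t => (PySem.Dict.contains_iff_mem_keys R t).symm.trans (hcontains t)
    by_cases hsp : S = []
    · have hkeys : R.keys = [] := by
        rw [List.eq_nil_iff_forall_not_mem]
        intro t ht
        obtain ⟨x, hx, -⟩ := (hkeysmem t).mp ht
        simp [hsp] at hx
      have hitems : R.items = [] := by
        have h2 := hkeys
        simp only [PySem.Dict.keys] at h2
        exact List.map_eq_nil_iff.mp h2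
      rw [if_pos hitems, if_pos hsp]
    · obtain ⟨x0, hx0⟩ := List.exists_mem_of_ne_nil S hsp
      have hx0lt : x0.1 < x0.2.2 := by
        have := (List.mem_filter.mp (hS ▸ hx0)).2
        simpa using this
      have hkeysne : R.keys ≠ [] := by
        intro hnil
        have : x0.1 ∈ R.keys := (hkeysmem x0.1).mpr ⟨x0, hx0, le_refl _, hx0lt⟩
        simp [hnil] at this
      have hitems : R.items ≠ [] := by
        intro hnil
        apply hkeysne
        simp only [PySem.Dict.keys, hnil, List.map_nil]
      rw [if_neg hitems, if_neg hsp]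
      -- extract the four extrema
      cases hmin : PySem.List.min? R.keys (fun k => k) with
      | none => exact absurd ((PySem.List.min?_eq_none_iff _ _).mp hmin) hkeysne
      | some m =>
      cases hmax : PySem.List.max? R.keys (fun k => k) with
      | none => exact absurd ((PySem.List.max?_eq_none_iff _ _).mp hmax) hkeysne
      | some M =>
      cases hmin2 : PySem.List.min? (S.map (fun x => x.1)) (fun k => k) with
      | none =>
        exact absurd (List.map_eq_nil_iff.mp ((PySem.List.min?_eq_none_iff _ _).mp hmin2)) hsp
      | some m2 =>
      cases hmax2 : PySem.List.max? (S.map (fun x => x.2.2)) (fun k => k) with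
      | none =>
        exact absurd (List.map_eq_nil_iff.mp ((PySem.List.max?_eq_none_iff _ _).mp hmax2)) hsp
      | some M2 =>
      simp only [Option.getD_some]
      -- m = m2
      have hmeq : m = m2 := by
        have h1 : m2 ≤ m := by
          obtain ⟨x, hx, hc1, -⟩ := (hkeysmem m).mp (PySem.List.min?_mem hmin)
          have := PySem.List.min?_isMin hmin2 x.1 (List.mem_map_of_mem hx)
          omega
        have h2 : m ≤ m2 := by
          obtain ⟨x, hx, hx1⟩ := List.mem_map.mp (PySem.List.min?_mem hmin2)
          have hxlt : x.1 < x.2.2 := by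
            have := (List.mem_filter.mp (hS ▸ hx)).2
            simpa using this
          have hk : x.1 ∈ R.keys := (hkeysmem x.1).mpr ⟨x, hx, le_refl _, hxlt⟩
          have := PySem.List.min?_isMin hmin x.1 hk
          omega
        omega
      have hMeq : M = M2 - 1 := by
        have h1 : M ≤ M2 - 1 := by
          obtain ⟨x, hx, -, hc2⟩ := (hkeysmem M).mp (PySem.List.max?_mem hmax)
          have := PySem.List.max?_isMax hmax2 x.2.2 (List.mem_map_of_mem hx)
          omega
        have h2 : M2 - 1 ≤ M := by
          obtain ⟨x, hx, hx1⟩ := List.mem_map.mp (PySem.List.max?_mem hmax2)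
          have hxlt : x.1 < x.2.2 := by
            have := (List.mem_filter.mp (hS ▸ hx)).2
            simpa using this
          have hk : (M2 - 1) ∈ R.keys := (hkeysmem (M2 - 1)).mpr ⟨x, hx, by omega, by omega⟩
          have := PySem.List.max?_isMax hmax (M2 - 1) hk
          omega
        omega
      have hrange : M + 1 = (M2 - 1) + 1 := by omega
      rw [hmeq, hrange]
      -- LHS: the fill loop over fresh distinct keys is a map
      rw [PySem.Dict.items_foldl_insert_fresh (PySem.List.pyRange m2 (M2 - 1 + 1) 1)
        (fun t => t) (fun t => R.get? t) PySem.Dict.empty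
        (fun a _ => PySem.Dict.contains_empty a)
        (by simpa [List.map_id] using PySem.List.nodup_pyRange_one m2 (M2 - 1 + 1))]
      simp only [PySem.Dict.empty, PySem.Dict.items, List.nil_append]
      apply List.map_congr_left
      intro t ht
      have hval : R.getD t [] = PySem.Set.ofList
          ((S.filter (fun x => decide (x.1 ≤ t ∧ t < x.2.2))).map
            (fun x => (x.2.1, x.2.2 - x.1))) := by
        rw [hR, pvResult_getD, hS, pvFilter_cov_spans]
      rw [pvGet?_eq_ite R t []]
      by_cases hc : R.contains t = true
      · rw [if_pos hc]
        obtain ⟨x, hx, hcov⟩ := (hcontains t).mp hc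
        have hmemf : x ∈ S.filter (fun x => decide (x.1 ≤ t ∧ t < x.2.2)) :=
          List.mem_filter.mpr ⟨hx, by simpa using hcov⟩
        have hne : PySem.Set.ofList ((S.filter (fun x => decide (x.1 ≤ t ∧ t < x.2.2))).map
            (fun x => (x.2.1, x.2.2 - x.1))) ≠ [] := by
          apply pvOfList_ne_nil
          intro hmapnil
          rw [List.map_eq_nil_iff.mp hmapnil] at hmemf
          simp at hmemf
        rw [if_neg hne, hval]
      · rw [if_neg hc]
        have hfe : S.filter (fun x => decide (x.1 ≤ t ∧ t < x.2.2)) = [] := by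
          rw [List.eq_nil_iff_forall_not_mem]
          intro y hy
          have hyf := List.mem_filter.mp hy
          exact hc ((hcontains t).mpr ⟨y, hyf.1, by simpa using hyf.2⟩)
        have hae : PySem.Set.ofList ((S.filter (fun x => decide (x.1 ≤ t ∧ t < x.2.2))).map
            (fun x => (x.2.1, x.2.2 - x.1))) = [] := by
          rw [hfe]; rfl
        rw [if_pos hae]

-- ===== VERDICT (by name: the statement is the Claim_ definition above) =====
theorem group_notes_with_duration_spec : Claim_equal_group_notes_with_duration := by
  intro note_list _
  exact group_notes_with_duration_agree note_list
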